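-- pv_equiv track=rewrite | github.com/fcuzzocrea/micropython | leon-tests/leon_t1/ROB_STACK_03.py | f
-- ===== SOURCE A (Python) =====
-- def f(x):
--     # 4 * 24 = stack size of 96 objects = 768 bytes
--     l = [x, x, x, x, x, x, x, x, x, x, x, x, x, x, x, x, x, x, x, x, x, x, x, x,
--         x, x, x, x, x, x, x, x, x, x, x, x, x, x, x, x, x, x, x, x, x, x, x, x,
--         x, x, x, x, x, x, x, x, x, x, x, x, x, x, x, x, x, x, x, x, x, x, x, x,
--         x, x, x, x, x, x, x, x, x, x, x, x, x, x, x, x, x, x, x, x, x, x, x, x,]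
--     if x:
--         return len(l) + f(x - 1)
--     return len(l)
-- ===== SOURCE B (Python) =====
-- def f(x):
--     # closed form: each of the x+1 calls contributes len of a 96-element list
--     return 96 * (x + 1)
-- ===== Notes on version B (the rewrite author's own statement) =====
-- stated objective: simpler
-- what changed: Replaced the recursion that builds a 96-element list per call with the closed form 96*(x+1); O(x) work becomes O(1), though A raises RecursionError before timing inputs grow large enough to confirm this in a timing run.
import Mathlib
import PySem

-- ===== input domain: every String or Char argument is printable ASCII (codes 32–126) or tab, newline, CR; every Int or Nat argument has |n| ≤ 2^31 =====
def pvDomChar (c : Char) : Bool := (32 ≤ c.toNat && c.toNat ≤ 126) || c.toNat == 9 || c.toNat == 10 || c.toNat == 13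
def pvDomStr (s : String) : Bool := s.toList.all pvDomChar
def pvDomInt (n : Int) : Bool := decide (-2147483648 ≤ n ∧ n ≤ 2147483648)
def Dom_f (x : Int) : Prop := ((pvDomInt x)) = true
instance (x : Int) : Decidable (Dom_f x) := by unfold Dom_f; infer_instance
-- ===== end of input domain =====

-- B replaces A's recursion (96 per call) with the closed form 96*(x+1): simpler, one expression.


-- ===== PORT A =====
-- A's recursion on Int, made total with a fuel bound (x.toNat suffices for x ≥ 0;
-- for x < 0 the Python diverges, excluded by Pre_f). The branch order and the
-- 96-element list length are A's.
def fAux : Nat → Int → Int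
  | 0, _ => 96
  | fuel + 1, x => if x ≠ 0 then 96 + fAux fuel (x - 1) else 96

def f (x : Int) : Int := fAux x.toNat x

-- ===== PORT B =====
def f_alt (x : Int) : Int := 96 * (x + 1)

-- ===== PRECONDITION & SPEC =====
-- For x < 0 the Python A recurses without bound (RecursionError), so Pre_ excludes it.
def Pre_f (x : Int) : Prop := 0 ≤ x
instance (x : Int) : Decidable (Pre_f x) := by unfold Pre_f; infer_instance
def pvWitness_f : Int := (3)

def Spec_f (x : Int) (out : Int) : Prop := out = f_alt x
instance (x : Int) (out : Int) : Decidable (Spec_f x out) := by unfold Spec_f; infer_instance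

-- ===== CLAIM (what is proved, stated in full; the proofs are below) =====
def Claim_equal_f : Prop := ∀ (x : Int), Dom_f x → Pre_f x → Spec_f x (f x)

-- ===== LEMMAS AND PROOFS =====
theorem fAux_closed (n : Nat) : fAux n (n : Int) = 96 * ((n : Int) + 1) := by
  induction n with
  | zero => simp [fAux]
  | succ k ih =>
      simp only [fAux, Nat.cast_succ]
      rw [if_pos (by omega)]
      rw [show (k : Int) + 1 - 1 = (k : Int) by ring, ih]
      ring

-- ===== VERDICT (by name: the statement is the Claim_ definition above) =====
theorem f_spec : Claim_equal_f := by
  intro x _ hx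
  have hcast : ((x.toNat : Int)) = x := Int.toNat_of_nonneg hx
  show f x = f_alt x
  unfold f f_alt
  rw [← hcast]
  exact fAux_closed x.toNat
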